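-- pv_equiv track=rewrite | github.com/yashusinghal69/AI-Tutor-Chatbot-google-adk | app/tools/biology_tools.py | classify_organism
-- ===== SOURCE A (Python) =====
-- def classify_organism(characteristics: str) -> str:
--     """Classify organisms based on characteristics"""
--     characteristics = characteristics.lower()
--
--     classification = []
--
--     # Kingdom classification
--     if any(word in characteristics for word in ["plant", "photosynthesis", "chlorophyll", "cell wall"]):
--         classification.append("Kingdom: Plantae")
--     elif any(word in characteristics for word in ["animal", "multicellular", "heterotrophic", "mobile"]):
--         classification.append("Kingdom: Animalia")
--     elif any(word in characteristics for word in ["fungus", "fungi", "decomposer", "spores"]):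
--         classification.append("Kingdom: Fungi")
--     elif any(word in characteristics for word in ["bacteria", "prokaryotic", "single cell"]):
--         classification.append("Kingdom: Bacteria")
--
--     # Cell type
--     if any(word in characteristics for word in ["nucleus", "organelles", "membrane bound"]):
--         classification.append("Cell Type: Eukaryotic")
--     elif any(word in characteristics for word in ["no nucleus", "prokaryotic"]):
--         classification.append("Cell Type: Prokaryotic")
--
--     # Nutrition
--     if any(word in characteristics for word in ["photosynthesis", "autotrophic", "makes own food"]):
--         classification.append("Nutrition: Autotrophic")
--     elif any(word in characteristics for word in ["heterotrophic", "consumes", "eats"]):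
--         classification.append("Nutrition: Heterotrophic")
--
--     if classification:
--         return "Classification based on characteristics:\n" + "\n".join(classification)
--     else:
--         return "Unable to classify based on given characteristics. Please provide more specific traits."
-- ===== SOURCE B (Python) =====
-- KEYWORDS = ["plant", "photosynthesis", "chlorophyll", "cell wall",
--             "animal", "multicellular", "heterotrophic", "mobile",
--             "fungus", "fungi", "decomposer", "spores",
--             "bacteria", "prokaryotic", "single cell",
--             "nucleus", "organelles", "membrane bound", "no nucleus",
--             "autotrophic", "makes own food", "consumes", "eats"]
--
-- GROUPS = [
--     [("Kingdom: Plantae", ["plant", "photosynthesis", "chlorophyll", "cell wall"]),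
--      ("Kingdom: Animalia", ["animal", "multicellular", "heterotrophic", "mobile"]),
--      ("Kingdom: Fungi", ["fungus", "fungi", "decomposer", "spores"]),
--      ("Kingdom: Bacteria", ["bacteria", "prokaryotic", "single cell"])],
--     [("Cell Type: Eukaryotic", ["nucleus", "organelles", "membrane bound"]),
--      ("Cell Type: Prokaryotic", ["no nucleus", "prokaryotic"])],
--     [("Nutrition: Autotrophic", ["photosynthesis", "autotrophic", "makes own food"]),
--      ("Nutrition: Heterotrophic", ["heterotrophic", "consumes", "eats"])],
-- ]
--
--
-- def classify_organism(characteristics: str) -> str: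
--     """Classify organisms based on characteristics"""
--     text = characteristics.lower()
--     # Stage 1: one left-to-right scan of the text itself (a naive
--     # multi-pattern matcher): at each position, record every keyword
--     # that starts there.
--     found = set()
--     for i in range(len(text)):
--         for k in KEYWORDS:
--             if text.startswith(k, i):
--                 found.add(k)
--     # Stage 2: decide the labels purely from the matched-keyword set.
--     labels = []
--     for group in GROUPS:
--         for label, kws in group:
--             if any(k in found for k in kws):
--                 labels.append(label)
--                 break
--     if labels:
--         return "Classification based on characteristics:\n" + "\n".join(labels)
--     return "Unable to classify based on given characteristics. Please provide more specific traits."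
-- ===== Notes on version B (the rewrite author's own statement) =====
-- stated objective: alternative
-- what changed: Instead of A's nine hard-coded if/elif branches each running its own substring tests, B first does one position-by-position scan of the text (a naive multi-pattern matcher) collecting the set of all matched keywords, and then decides the labels purely from that set via a rule table with first-match-per-group precedence.
import Mathlib
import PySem

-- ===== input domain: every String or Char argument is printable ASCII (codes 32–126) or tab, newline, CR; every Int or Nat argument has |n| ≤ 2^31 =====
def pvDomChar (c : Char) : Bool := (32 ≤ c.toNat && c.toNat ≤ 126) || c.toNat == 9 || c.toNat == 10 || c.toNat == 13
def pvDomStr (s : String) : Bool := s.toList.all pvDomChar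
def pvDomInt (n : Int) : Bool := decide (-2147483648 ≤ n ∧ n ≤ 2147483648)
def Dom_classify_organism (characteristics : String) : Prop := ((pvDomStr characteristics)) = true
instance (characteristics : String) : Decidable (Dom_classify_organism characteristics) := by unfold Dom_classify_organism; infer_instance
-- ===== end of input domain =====

-- B replaces A's nine per-branch substring tests by one position scan of the text that
-- collects the set of matched keywords, followed by a table-driven decision (objective: alternative).

-- ===== PORT A =====
-- any(word in characteristics for word in ws)
def pvAnyIn (ch : String) (ws : List String) : Bool :=
  ws.any (fun w => PySem.Str.isIn w ch)

def classify_organism (characteristics : String) : String :=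
  let ch := PySem.Str.lower characteristics
  let classification : List String := []
  let classification :=
    if pvAnyIn ch ["plant", "photosynthesis", "chlorophyll", "cell wall"] then
      classification ++ ["Kingdom: Plantae"]
    else if pvAnyIn ch ["animal", "multicellular", "heterotrophic", "mobile"] then
      classification ++ ["Kingdom: Animalia"]
    else if pvAnyIn ch ["fungus", "fungi", "decomposer", "spores"] then
      classification ++ ["Kingdom: Fungi"]
    else if pvAnyIn ch ["bacteria", "prokaryotic", "single cell"] then
      classification ++ ["Kingdom: Bacteria"]
    else classification
  let classification :=
    if pvAnyIn ch ["nucleus", "organelles", "membrane bound"] then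
      classification ++ ["Cell Type: Eukaryotic"]
    else if pvAnyIn ch ["no nucleus", "prokaryotic"] then
      classification ++ ["Cell Type: Prokaryotic"]
    else classification
  let classification :=
    if pvAnyIn ch ["photosynthesis", "autotrophic", "makes own food"] then
      classification ++ ["Nutrition: Autotrophic"]
    else if pvAnyIn ch ["heterotrophic", "consumes", "eats"] then
      classification ++ ["Nutrition: Heterotrophic"]
    else classification
  if classification.isEmpty then
    "Unable to classify based on given characteristics. Please provide more specific traits."
  else
    "Classification based on characteristics:\n" ++ PySem.Str.join "\n" classification

-- ===== PORT B =====
def pvKeywords : List String :=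
  ["plant", "photosynthesis", "chlorophyll", "cell wall",
   "animal", "multicellular", "heterotrophic", "mobile",
   "fungus", "fungi", "decomposer", "spores",
   "bacteria", "prokaryotic", "single cell",
   "nucleus", "organelles", "membrane bound", "no nucleus",
   "autotrophic", "makes own food", "consumes", "eats"]

def pvGroups : List (List (String × List String)) :=
  [[("Kingdom: Plantae", ["plant", "photosynthesis", "chlorophyll", "cell wall"]),
    ("Kingdom: Animalia", ["animal", "multicellular", "heterotrophic", "mobile"]),
    ("Kingdom: Fungi", ["fungus", "fungi", "decomposer", "spores"]),
    ("Kingdom: Bacteria", ["bacteria", "prokaryotic", "single cell"])],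
   [("Cell Type: Eukaryotic", ["nucleus", "organelles", "membrane bound"]),
    ("Cell Type: Prokaryotic", ["no nucleus", "prokaryotic"])],
   [("Nutrition: Autotrophic", ["photosynthesis", "autotrophic", "makes own food"]),
    ("Nutrition: Heterotrophic", ["heterotrophic", "consumes", "eats"])]]

-- 'for i in range(len(text)): for k in KEYWORDS: if text.startswith(k, i): found.add(k)'
-- ported on the char list: range(len(text)) = List.range, text.startswith(k, i) = k starts
-- the i-th suffix (PySem.Chars.startswith on cs.drop i); both exact on this domain.
def pvFound (characteristics : String) : PySem.Set String :=
  let cs := (PySem.Str.lower characteristics).toList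
  (List.range cs.length).foldl
    (fun f i =>
      pvKeywords.foldl
        (fun f k => if PySem.Chars.startswith (cs.drop i) k.toList then PySem.Set.add f k else f)
        f)
    PySem.Set.empty

-- inner 'for label, kws in group: if any(...): append; break' = first matching pair's label
def pvFirstLabel (found : PySem.Set String) : List (String × List String) → Option String
  | [] => none
  | (label, kws) :: rest =>
      if kws.any (fun k => PySem.Set.contains found k) then some label
      else pvFirstLabel found rest

def classify_organism_alt (characteristics : String) : String :=
  let found := pvFound characteristics
  let labels :=
    pvGroups.foldl
      (fun labels group =>
        match pvFirstLabel found group with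
        | some l => labels ++ [l]
        | none => labels)
      []
  if labels.isEmpty then
    "Unable to classify based on given characteristics. Please provide more specific traits."
  else
    "Classification based on characteristics:\n" ++ PySem.Str.join "\n" labels

-- ===== PRECONDITION & SPEC =====
def Spec_classify_organism (characteristics : String) (out : String) : Prop := out = classify_organism_alt characteristics
instance (characteristics : String) (out : String) : Decidable (Spec_classify_organism characteristics out) := by unfold Spec_classify_organism; infer_instance

-- ===== CLAIM (what is proved, stated in full; the proofs are below) =====
def Claim_equal_classify_organism : Prop := ∀ (characteristics : String), Dom_classify_organism characteristics → Spec_classify_organism characteristics (classify_organism characteristics)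

-- ===== LEMMAS AND PROOFS =====

-- membership in the inner keyword fold
lemma mem_foldl_addIf (p : String → Bool) (ks : List String) (f : PySem.Set String) (k : String) :
    (k ∈ ks.foldl (fun f x => if p x then PySem.Set.add f x else f) f) ↔
      k ∈ f ∨ (k ∈ ks ∧ p k = true) := by
  induction ks generalizing f with
  | nil => simp
  | cons x xs ih =>
      simp only [List.foldl_cons]
      by_cases h : p x = true
      · rw [if_pos h, ih]
        simp only [PySem.Set.mem_add, List.mem_cons]
        constructor
        · rintro ((hf | rfl) | hx)
          · exact Or.inl hf
          · exact Or.inr ⟨Or.inl rfl, h⟩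
          · exact Or.inr ⟨Or.inr hx.1, hx.2⟩
        · rintro (hf | ⟨rfl | hx, hp⟩)
          · exact Or.inl (Or.inl hf)
          · exact Or.inl (Or.inr rfl)
          · exact Or.inr ⟨hx, hp⟩
      · rw [if_neg h, ih]
        simp only [List.mem_cons]
        constructor
        · rintro (hf | hx)
          · exact Or.inl hf
          · exact Or.inr ⟨Or.inr hx.1, hx.2⟩
        · rintro (hf | ⟨rfl | hx, hp⟩)
          · exact Or.inl hf
          · exact absurd hp h
          · exact Or.inr ⟨hx, hp⟩

-- membership in the whole position scan
lemma mem_scan (q : Nat → String → Bool) (is : List Nat) (ks : List String)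
    (f : PySem.Set String) (k : String) :
    (k ∈ is.foldl
        (fun f i => ks.foldl (fun f x => if q i x then PySem.Set.add f x else f) f) f) ↔
      k ∈ f ∨ (k ∈ ks ∧ ∃ i ∈ is, q i k = true) := by
  induction is generalizing f with
  | nil => simp
  | cons i is ih =>
      simp only [List.foldl_cons, ih, mem_foldl_addIf, List.mem_cons]
      constructor
      · rintro ((hf | ⟨hk, hp⟩) | ⟨hk, j, hj, hq⟩)
        · exact Or.inl hf
        · exact Or.inr ⟨hk, i, Or.inl rfl, hp⟩
        · exact Or.inr ⟨hk, j, Or.inr hj, hq⟩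
      · rintro (hf | ⟨hk, j, (rfl | hj), hq⟩)
        · exact Or.inl (Or.inl hf)
        · exact Or.inl (Or.inr ⟨hk, hq⟩)
        · exact Or.inr ⟨hk, j, hj, hq⟩

-- a keyword is in the found set iff it is a substring of the lowered text
lemma contains_found (ch : String) (k : String) (hk : k ∈ pvKeywords) (hne : k.toList ≠ []) :
    PySem.Set.contains (pvFound ch) k = PySem.Str.isIn k (PySem.Str.lower ch) := by
  have hmem : (k ∈ pvFound ch) ↔ PySem.Str.isIn k (PySem.Str.lower ch) = true := by
    unfold pvFound
    rw [mem_scan]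
    simp only [PySem.Set.empty, List.not_mem_nil, false_or]
    rw [PySem.Str.isIn_eq]
    rw [← PySem.Chars.exists_prefix_drop_iff_isIn]
    constructor
    · rintro ⟨-, j, hj, hq⟩
      rw [PySem.Chars.startswith_iff] at hq
      exact ⟨j, hq⟩
    · rintro ⟨j, hq⟩
      refine ⟨hk, j, ?_, ?_⟩
      · rw [List.mem_range]
        by_contra h
        have : (PySem.Str.lower ch).toList.drop j = [] :=
          List.drop_eq_nil_of_le (by omega)
        rw [this] at hq
        exact hne (List.prefix_nil.mp hq)
      · rw [PySem.Chars.startswith_iff]; exact hq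
  cases h : PySem.Str.isIn k (PySem.Str.lower ch) with
  | true =>
      have hm : k ∈ pvFound ch := hmem.mpr h
      simpa using hm
  | false =>
      have hm : k ∉ pvFound ch := fun hm => by
        rw [hmem, h] at hm; cases hm
      simpa using hm

-- ===== VERDICT (by name: the statement is the Claim_ definition above) =====
set_option maxHeartbeats 1000000 in
theorem classify_organism_spec : Claim_equal_classify_organism := by
  intro ch _
  have hc : ∀ (ws : List String), (∀ w ∈ ws, w ∈ pvKeywords ∧ w.toList ≠ []) →
      ws.any (fun k => PySem.Set.contains (pvFound ch) k)
        = ws.any (fun w => PySem.Str.isIn w (PySem.Str.lower ch)) := by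
    intro ws h
    exact PySem.List.any_congr_mem (fun w hw => contains_found ch w (h w hw).1 (h w hw).2)
  unfold Spec_classify_organism classify_organism classify_organism_alt pvGroups pvAnyIn
  simp only [List.foldl_cons, List.foldl_nil, pvFirstLabel]
  rw [hc _ (by decide), hc _ (by decide), hc _ (by decide), hc _ (by decide),
      hc _ (by decide), hc _ (by decide), hc _ (by decide), hc _ (by decide)]
  generalize (List.any ["plant", "photosynthesis", "chlorophyll", "cell wall"] fun w => PySem.Str.isIn w (PySem.Str.lower ch)) = b0
  generalize (List.any ["animal", "multicellular", "heterotrophic", "mobile"] fun w => PySem.Str.isIn w (PySem.Str.lower ch)) = b1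
  generalize (List.any ["fungus", "fungi", "decomposer", "spores"] fun w => PySem.Str.isIn w (PySem.Str.lower ch)) = b2
  generalize (List.any ["bacteria", "prokaryotic", "single cell"] fun w => PySem.Str.isIn w (PySem.Str.lower ch)) = b3
  generalize (List.any ["nucleus", "organelles", "membrane bound"] fun w => PySem.Str.isIn w (PySem.Str.lower ch)) = b4
  generalize (List.any ["no nucleus", "prokaryotic"] fun w => PySem.Str.isIn w (PySem.Str.lower ch)) = b5
  generalize (List.any ["photosynthesis", "autotrophic", "makes own food"] fun w => PySem.Str.isIn w (PySem.Str.lower ch)) = b6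
  generalize (List.any ["heterotrophic", "consumes", "eats"] fun w => PySem.Str.isIn w (PySem.Str.lower ch)) = b7
  revert b0 b1 b2 b3 b4 b5 b6 b7
  decide
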